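-- pv_equiv track=rewrite | github.com/mscheibl/NEEM_Evaluator | src/neem_evaluator/helper.py | cluster_to_actions
-- ===== SOURCE A (Python) =====
-- from typing import Dict, Tuple, List, Iterable
--
-- def cluster_to_actions(cluster: List, seq_to_actions: dict) -> dict:
--     """
--     Matches clusters of sequences to actions that happened during the sequence.
--
--     :param cluster: List with cluster of sequences
--     :param seq_to_actions: Mapping of sequences to actions
--     :return: A dictionary mapping individual sequences to action
--     """
--     result = {}
--     i = 0
--     for cls in cluster:
--         try:
--             mapping = [seq_to_actions[x] for x in cls]
--             result[i] = mapping
--         except KeyError: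
--             pass
--         i += 1
--     return result
-- ===== SOURCE B (Python) =====
-- _MISSING = object()
--
-- def cluster_to_actions(cluster, seq_to_actions):
--     """Recursive, back-to-front: build the tail's pairs first, prepend this
--     cluster's (index, mapping) pair if its sentinel-driven scan succeeds, and
--     convert the finished association list to a dict once at the end."""
--     def translate(cls):
--         out = []
--         for x in cls:
--             v = seq_to_actions.get(x, _MISSING)
--             if v is _MISSING:
--                 return None
--             out.append(v)
--         return out
--
--     def build(i, rest):
--         if not rest:
--             return []
--         tail = build(i + 1, rest[1:])
--         m = translate(rest[0])
--         return [(i, m)] + tail if m is not None else tail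
--
--     return dict(build(0, list(cluster)))
-- ===== Notes on version B (the rewrite author's own statement) =====
-- stated objective: alternative
-- what changed: Replaces A's single mutating loop (counter, try/except discard, incremental dict insertion) by structural recursion that builds an association list back-to-front (tail first, then cons), with a sentinel-and-break inner scan instead of exceptions, and one final dict() conversion.
import Mathlib
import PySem

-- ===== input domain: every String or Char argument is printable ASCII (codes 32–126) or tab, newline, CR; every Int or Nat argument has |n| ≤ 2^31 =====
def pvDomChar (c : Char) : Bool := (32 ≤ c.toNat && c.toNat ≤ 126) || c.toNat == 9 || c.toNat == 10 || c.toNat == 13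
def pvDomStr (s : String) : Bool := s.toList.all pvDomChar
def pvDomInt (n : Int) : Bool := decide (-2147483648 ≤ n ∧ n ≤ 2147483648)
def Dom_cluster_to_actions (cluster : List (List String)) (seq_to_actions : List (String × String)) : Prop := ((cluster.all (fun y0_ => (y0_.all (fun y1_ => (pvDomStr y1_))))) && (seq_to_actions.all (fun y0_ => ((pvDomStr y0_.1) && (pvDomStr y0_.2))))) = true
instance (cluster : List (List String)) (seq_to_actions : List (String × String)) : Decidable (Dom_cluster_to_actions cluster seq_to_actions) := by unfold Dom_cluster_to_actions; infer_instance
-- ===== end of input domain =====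

-- B replaces A's mutating counter loop with try/except discard by structural recursion
-- building an association list back-to-front (sentinel inner scan, one dict() at the end);
-- alternative decomposition, same cost.

-- ===== PORT A =====
-- the for-loop: result dict and counter i; the comprehension with KeyError is mapM over get?
def clusterLoopA (d : PySem.Dict String String) :
    List (List String) → PySem.Dict Int (List String) → Int → PySem.Dict Int (List String)
  | [], result, _ => result
  | cls :: rest, result, i =>
    match cls.mapM (fun x => d.get? x) with
    | some mapping => clusterLoopA d rest (result.insert i mapping) (i + 1)
    | none => clusterLoopA d rest result (i + 1)

def cluster_to_actions (cluster : List (List String)) (seq_to_actions : List (String × String)) : List (Int × List String) :=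
  (clusterLoopA (PySem.Dict.ofList seq_to_actions) cluster PySem.Dict.empty 0).items

-- ===== PORT B =====
-- inner sentinel loop of Source B's translate: accumulate looked-up values, stop at first miss
def translateB (d : PySem.Dict String String) : List String → List String → Option (List String)
  | [], out => some out
  | x :: xs, out =>
    match d.get? x with
    | none => none                     -- sentinel hit: discard
    | some v => translateB d xs (out ++ [v])

-- Source B's build: recurse to the tail first, then prepend this cluster's pair if it translates
def buildB (d : PySem.Dict String String) : Int → List (List String) → List (Int × List String)
  | _, [] => []
  | i, cls :: rest =>
    let tail := buildB d (i + 1) rest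
    match translateB d cls [] with
    | some m => (i, m) :: tail
    | none => tail

def cluster_to_actions_alt (cluster : List (List String)) (seq_to_actions : List (String × String)) : List (Int × List String) :=
  let d := PySem.Dict.ofList seq_to_actions
  (PySem.Dict.ofList (buildB d 0 cluster)).items

-- ===== PRECONDITION & SPEC =====
def Spec_cluster_to_actions (cluster : List (List String)) (seq_to_actions : List (String × String)) (out : List (Int × List String)) : Prop := out = cluster_to_actions_alt cluster seq_to_actions
instance (cluster : List (List String)) (seq_to_actions : List (String × String)) (out : List (Int × List String)) : Decidable (Spec_cluster_to_actions cluster seq_to_actions out) := by unfold Spec_cluster_to_actions; infer_instance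

-- ===== CLAIM (what is proved, stated in full; the proofs are below) =====
def Claim_equal_cluster_to_actions : Prop := ∀ (cluster : List (List String)) (seq_to_actions : List (String × String)), Dom_cluster_to_actions cluster seq_to_actions → Spec_cluster_to_actions cluster seq_to_actions (cluster_to_actions cluster seq_to_actions)

-- ===== LEMMAS AND PROOFS =====

-- translateB with accumulator = mapM over get?, prefixed with the accumulator
theorem translateB_eq_mapM (d : PySem.Dict String String) (cls acc : List String) :
    translateB d cls acc = (cls.mapM (fun x => d.get? x)).map (acc ++ ·) := by
  induction cls generalizing acc with
  | nil => simp [translateB]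
  | cons y ys ih =>
    cases h : d.get? y with
    | none => simp [translateB, h, List.mapM_cons]
    | some v =>
      simp only [translateB, h, ih, List.mapM_cons, Option.bind_eq_bind]
      cases ys.mapM (fun x => d.get? x) <;> simp

-- A's loop, expressed through buildB: it appends exactly B's association list
theorem clusterLoopA_items (d : PySem.Dict String String) (cluster : List (List String))
    (res : PySem.Dict Int (List String)) (i : Int)
    (hnd : res.keys.Nodup) (hlt : ∀ k ∈ res.keys, k < i) :
    (clusterLoopA d cluster res i).items = res.items ++ buildB d i cluster := by
  induction cluster generalizing res i with
  | nil => simp [clusterLoopA, buildB]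
  | cons cls rest ih =>
    cases hm : cls.mapM (fun x => d.get? x) with
    | none =>
      rw [clusterLoopA, hm, ih res (i + 1) hnd (by intro k hk; have := hlt k hk; omega)]
      simp [buildB, translateB_eq_mapM, hm]
    | some m =>
      have hnc : res.contains i = false := by
        rw [← Bool.not_eq_true, PySem.Dict.contains_iff_mem_keys]
        intro hmem; exact absurd rfl (Int.ne_of_lt (hlt i hmem))
      rw [clusterLoopA, hm,
        ih (res.insert i m) (i + 1) (PySem.Dict.nodup_keys_insert res _ _ hnd)
          (by intro k hk
              rcases (PySem.Dict.mem_keys_insert _ _ _ _).1 hk with h | h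
              · omega
              · have := hlt k h; omega),
        PySem.Dict.items_insert_of_not_contains (d := res) (k := i) (v := m) hnc]
      simp [buildB, translateB_eq_mapM, hm]

-- buildB's keys are distinct (all ≥ i, strictly increasing)
theorem buildB_keys_ge (d : PySem.Dict String String) (cluster : List (List String)) (i : Int) :
    ∀ p ∈ buildB d i cluster, i ≤ p.1 := by
  induction cluster generalizing i with
  | nil => simp [buildB]
  | cons cls rest ih =>
    intro p hp
    rw [buildB] at hp
    cases hm : translateB d cls [] with
    | none =>
      rw [hm] at hp
      have := ih (i + 1) p hp; omega
    | some m =>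
      rw [hm] at hp
      rcases List.mem_cons.1 hp with h | h
      · simp [h]
      · have := ih (i + 1) p h; omega

theorem buildB_keys_nodup (d : PySem.Dict String String) (cluster : List (List String)) (i : Int) :
    ((buildB d i cluster).map Prod.fst).Nodup := by
  induction cluster generalizing i with
  | nil => simp [buildB]
  | cons cls rest ih =>
    rw [buildB]
    cases hm : translateB d cls [] with
    | none => exact ih (i + 1)
    | some m =>
      simp only [List.map_cons, List.nodup_cons]
      refine ⟨fun hmem => ?_, ih (i + 1)⟩
      rcases List.mem_map.1 hmem with ⟨p, hp, hpe⟩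
      have := buildB_keys_ge d rest (i + 1) p hp
      omega

-- dict(l) over a list with distinct keys has items = l
theorem items_ofList_of_nodup {ν : Type} (l : List (Int × ν))
    (h : (l.map Prod.fst).Nodup) : (PySem.Dict.ofList l).items = l := by
  have := PySem.Dict.items_foldl_insert_fresh (l := l) (k := Prod.fst) (v := Prod.snd)
    (d := PySem.Dict.empty) (by simp [PySem.Dict.contains_empty]) h
  simpa [PySem.Dict.ofList, PySem.Dict.update] using this

-- ===== VERDICT (by name: the statement is the Claim_ definition above) =====
theorem cluster_to_actions_spec : Claim_equal_cluster_to_actions := by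
  intro cluster seq _
  unfold Spec_cluster_to_actions cluster_to_actions cluster_to_actions_alt
  rw [clusterLoopA_items _ _ _ _ (by simp [PySem.Dict.keys_empty]) (by simp [PySem.Dict.keys_empty]),
    items_ofList_of_nodup _ (buildB_keys_nodup _ _ _)]
  simp [PySem.Dict.empty]
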